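-- pv_equiv track=rewrite | github.com/rl337/todorama-mcp-service | src/conversation_storage.py | validate_prompt_template
-- ===== SOURCE A (Python) =====
-- from typing import Optional, List, Dict, Any, Tuple, Union
--
-- def validate_prompt_template(template_content: str) -> Tuple[bool, Optional[str]]:
--     """
--     Validate prompt template syntax.
--
--     Args:
--         template_content: Template content to validate
--
--     Returns:
--         Tuple of (is_valid, error_message)
--     """
--     try:
--         # Check for balanced braces (for template variables like {variable})
--         brace_count = 0
--         in_brace = False
--         i = 0
--
--         while i < len(template_content):
--             if template_content[i] == '{':
--                 if in_brace:
--                     return False, "Nested braces are not allowed"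
--                 in_brace = True
--                 brace_count += 1
--             elif template_content[i] == '}':
--                 if not in_brace:
--                     return False, "Unmatched closing brace"
--                 in_brace = False
--                 # Validate variable name (simple validation - alphanumeric and underscore)
--                 if i > 0 and template_content[i-1] == '{':
--                     return False, "Empty variable name not allowed"
--             i += 1
--
--         if in_brace:
--             return False, "Unclosed brace in template"
--
--         return True, None
--     except Exception as e:
--         return False, f"Template validation error: {str(e)}"
-- ===== SOURCE B (Python) =====
-- def validate_prompt_template(template_content):
--     """Staged validation: split the template on '{'; the head must contain no '}',
--     and every later piece must contain exactly one '}' at a positive offset."""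
--     head, *rest = template_content.split('{')
--     if '}' in head:
--         return False, "Unmatched closing brace"
--     for k, part in enumerate(rest):
--         j = part.find('}')
--         if j == -1:
--             if k == len(rest) - 1:
--                 return False, "Unclosed brace in template"
--             return False, "Nested braces are not allowed"
--         if j == 0:
--             return False, "Empty variable name not allowed"
--         if '}' in part[j + 1:]:
--             return False, "Unmatched closing brace"
--     return True, None
-- ===== Notes on version B (the rewrite author's own statement) =====
-- stated objective: faster
-- what changed: B replaces A's per-character Python state-machine walk by a staged decomposition: split the template on the opening brace and validate each resulting piece with a single find of the closing brace (head piece must contain none, every later piece exactly one at a positive offset, last-vs-inner piece distinguishing unclosed from nested), pushing the scanning into C-level str.split/str.find.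
import Mathlib
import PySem

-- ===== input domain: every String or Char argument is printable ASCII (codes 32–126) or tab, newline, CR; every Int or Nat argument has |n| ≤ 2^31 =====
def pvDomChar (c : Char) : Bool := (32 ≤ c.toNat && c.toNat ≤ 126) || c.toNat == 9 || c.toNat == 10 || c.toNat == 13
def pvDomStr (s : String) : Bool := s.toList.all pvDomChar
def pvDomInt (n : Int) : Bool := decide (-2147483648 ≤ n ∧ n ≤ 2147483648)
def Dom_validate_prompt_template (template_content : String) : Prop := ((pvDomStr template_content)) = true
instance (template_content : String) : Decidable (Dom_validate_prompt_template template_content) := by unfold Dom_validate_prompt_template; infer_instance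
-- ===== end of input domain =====

-- B validates by splitting the template on the opening brace and checking each piece with one find of the closing brace, instead of A's per-character state machine; same return value (measured faster: C-level split/find vs a Python char loop).

-- ===== PORT A =====
-- Literal port of A's while loop; fuel = cs.length makes the recursion structural
-- (with i starting at 0 the fuel runs out exactly when i = cs.length).
-- s[i-1] (guarded by i > 0, i < len) is ported as cs[i-1]? = some '{' — in range there, exact.
def pvLoopA (cs : List Char) : Nat → Nat → Int → Bool → Bool × Option String
  | fuel+1, i, brace_count, in_brace =>
    if h : i < cs.length then
      if cs[i] = '{' then
        if in_brace then (false, some "Nested braces are not allowed")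
        else pvLoopA cs fuel (i+1) (brace_count + 1) true
      else if cs[i] = '}' then
        if in_brace = false then (false, some "Unmatched closing brace")
        else if 0 < i ∧ cs[i-1]? = some '{' then (false, some "Empty variable name not allowed")
        else pvLoopA cs fuel (i+1) brace_count false
      else pvLoopA cs fuel (i+1) brace_count in_brace
    else
      if in_brace then (false, some "Unclosed brace in template") else (true, none)
  | 0, _, _, in_brace =>
      if in_brace then (false, some "Unclosed brace in template") else (true, none)

def validate_prompt_template (template_content : String) : Bool × Option String :=
  pvLoopA template_content.toList template_content.toList.length 0 0 false

-- ===== PORT B =====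
-- Hand port of str.split(sep) for the one-character separator '{' (exact there:
-- Python returns the maximal '{'-free pieces, with '' pieces kept, and [''] on '').
def pvSplitB (cs : List Char) : List (List Char) :=
  match h : cs.dropWhile (· ≠ '{') with
  | [] => [cs.takeWhile (· ≠ '{')]
  | _ :: r => cs.takeWhile (· ≠ '{') :: pvSplitB r
termination_by cs.length
decreasing_by
  have h1 := List.length_dropWhile_le (fun c => decide (c ≠ '{')) cs
  rw [h] at h1; simp at h1; omega

-- the for-loop over rest: k = len(rest)-1 becomes "tail of parts empty"
def pvPartsB : List (List Char) → Bool × Option String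
  | [] => (true, none)
  | p :: ps =>
    let j := PySem.Chars.find p ['}']
    if j = -1 then
      if ps = [] then (false, some "Unclosed brace in template")
      else (false, some "Nested braces are not allowed")
    else if j = 0 then (false, some "Empty variable name not allowed")
    else if PySem.Chars.isIn ['}'] (PySem.List.slice p (some (j+1)) none) then
      (false, some "Unmatched closing brace")
    else pvPartsB ps

def validate_prompt_template_alt (template_content : String) : Bool × Option String :=
  match pvSplitB template_content.toList with
  | [] => (true, none)   -- unreachable: split never returns an empty list
  | head :: rest =>
    if PySem.Chars.isIn ['}'] head then (false, some "Unmatched closing brace")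
    else pvPartsB rest

-- ===== PRECONDITION & SPEC =====
def Spec_validate_prompt_template (template_content : String) (out : Bool × Option String) : Prop := out = validate_prompt_template_alt template_content
instance (template_content : String) (out : Bool × Option String) : Decidable (Spec_validate_prompt_template template_content out) := by unfold Spec_validate_prompt_template; infer_instance

-- ===== CLAIM (what is proved, stated in full; the proofs are below) =====
def Claim_equal_validate_prompt_template : Prop := ∀ (template_content : String), Dom_validate_prompt_template template_content → Spec_validate_prompt_template template_content (validate_prompt_template template_content)

-- ===== LEMMAS AND PROOFS =====

-- Clean two-state reading of A's loop (state = closed / open-with-justOpened-flag).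
mutual
def pvClosed : List Char → Bool × Option String
  | [] => (true, none)
  | c :: rest =>
    if c = '{' then pvOpen true rest
    else if c = '}' then (false, some "Unmatched closing brace")
    else pvClosed rest
def pvOpen : Bool → List Char → Bool × Option String
  | _, [] => (false, some "Unclosed brace in template")
  | jo, c :: rest =>
    if c = '{' then (false, some "Nested braces are not allowed")
    else if c = '}' then
      if jo then (false, some "Empty variable name not allowed") else pvClosed rest
    else pvOpen false rest
end

lemma pvLoopA_eq_states (cs : List Char) : ∀ (fuel i : Nat) (bc : Int) (ib : Bool),
    cs.length ≤ fuel + i → (ib = true → 0 < i) →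
    pvLoopA cs fuel i bc ib =
      if ib then pvOpen (cs[i-1]? == some '{') (cs.drop i) else pvClosed (cs.drop i) := by
  intro fuel
  induction fuel with
  | zero =>
    intro i bc ib hlen _
    have hdrop : cs.drop i = [] := List.drop_eq_nil_of_le (by omega)
    cases ib <;> simp [pvLoopA, hdrop, pvClosed, pvOpen]
  | succ fuel ih =>
    intro i bc ib hlen hpos
    by_cases h : i < cs.length
    · have hdrop : cs.drop i = cs[i] :: cs.drop (i+1) := (List.getElem_cons_drop h).symm
      have hprev : cs[(i+1)-1]? = some cs[i] := by
        simp [List.getElem?_eq_getElem h]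
      by_cases hb : cs[i] = '{'
      · cases ib with
        | true => simp [pvLoopA, h, hb, hdrop, pvOpen]
        | false =>
          have hrec := ih (i+1) (bc+1) true (by omega) (by omega)
          rw [hprev, if_pos rfl] at hrec
          simp only [pvLoopA, dif_pos h, if_pos hb, Bool.false_eq_true, if_false]
          rw [hrec, hdrop]
          simp [pvClosed, hb]
      · by_cases hc : cs[i] = '}'
        · cases ib with
          | false => simp [pvLoopA, h, hc, hdrop, pvClosed]
          | true =>
            have hi : 0 < i := hpos rfl
            by_cases hadj : cs[i-1]? = some '{'
            · simp [pvLoopA, h, hc, hi, hadj, hdrop, pvOpen]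
            · have hrec := ih (i+1) bc false (by omega) (by simp)
              simp only [Bool.false_eq_true, if_false] at hrec
              simp only [pvLoopA, dif_pos h, if_neg hb, if_pos hc, Bool.true_eq_false,
                if_false]
              rw [if_neg (by intro hx; exact hadj hx.2), hrec, hdrop]
              simp [pvOpen, hc, hadj]
        · have hrec := ih (i+1) bc ib (by omega) (by omega)
          rw [hprev] at hrec
          simp only [pvLoopA, dif_pos h, if_neg hb, if_neg hc]
          rw [hrec, hdrop]
          have hbe : (cs[i] == '{') = false := by simp [hb]
          cases ib <;> simp [pvClosed, pvOpen, hb, hc, hbe]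
    · have hdrop : cs.drop i = [] := List.drop_eq_nil_of_le (by omega)
      cases ib <;> simp [pvLoopA, h, hdrop, pvClosed, pvOpen]

lemma infix_singleton_iff_mem (c : Char) (l : List Char) : [c] <:+: l ↔ c ∈ l := by
  constructor
  · intro h; exact h.subset (List.mem_singleton_self c)
  · intro h
    obtain ⟨s, t, rfl⟩ := List.append_of_mem h
    exact ⟨s, t, by simp⟩

lemma isIn_singleton (c : Char) (l : List Char) :
    PySem.Chars.isIn [c] l = true ↔ c ∈ l := by
  rw [PySem.Chars.isIn_iff_infix, infix_singleton_iff_mem]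

lemma pvSplitB_no_brace (cs : List Char) (h : '{' ∉ cs) : pvSplitB cs = [cs] := by
  have hd : cs.dropWhile (· ≠ '{') = [] := by
    rw [List.dropWhile_eq_nil_iff]
    intro x hx
    simp only [ne_eq, decide_not, Bool.not_eq_eq_eq_not, Bool.not_true, decide_eq_false_iff_not]
    exact fun he => h (he ▸ hx)
  have ht : cs.takeWhile (· ≠ '{') = cs := by
    rw [List.takeWhile_eq_self_iff]
    intro x hx
    simp only [ne_eq, decide_not, Bool.not_eq_eq_eq_not, Bool.not_true, decide_eq_false_iff_not]
    exact fun he => h (he ▸ hx)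
  rw [pvSplitB.eq_def]
  split
  · rw [ht]
  · next heq => rw [hd] at heq; simp at heq

lemma pvSplitB_ne_nil (cs : List Char) : pvSplitB cs ≠ [] := by
  rw [pvSplitB.eq_def]; split <;> simp

lemma pvSplitB_append (p r : List Char) (h : '{' ∉ p) :
    pvSplitB (p ++ '{' :: r) = p :: pvSplitB r := by
  have haux : ∀ q : List Char, '{' ∉ q →
      (q ++ '{' :: r).dropWhile (· ≠ '{') = '{' :: r ∧
      (q ++ '{' :: r).takeWhile (· ≠ '{') = q := by
    intro q hq
    induction q with
    | nil => simp [List.dropWhile_cons, List.takeWhile_cons]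
    | cons c t ih =>
      have hc : c ≠ '{' := fun he => hq (he ▸ List.mem_cons_self ..)
      have h2 := ih (fun hm => hq (List.mem_cons_of_mem _ hm))
      simp only [ne_eq, decide_not] at h2 ⊢
      simp [List.dropWhile_cons, List.takeWhile_cons, hc, h2.1, h2.2]
  obtain ⟨hd, ht⟩ := haux p h
  rw [pvSplitB.eq_def]
  split
  · next heq => rw [hd] at heq; simp at heq
  · next heq =>
    rw [hd] at heq
    cases heq
    rw [ht]

lemma pvClosed_skip (p cs' : List Char) (h1 : '{' ∉ p) (h2 : '}' ∉ p) :
    pvClosed (p ++ cs') = pvClosed cs' := by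
  induction p with
  | nil => rfl
  | cons c t ih =>
    have hc1 : c ≠ '{' := fun he => h1 (he ▸ List.mem_cons_self ..)
    have hc2 : c ≠ '}' := fun he => h2 (he ▸ List.mem_cons_self ..)
    rw [List.cons_append]
    simp only [pvClosed, if_neg hc1, if_neg hc2]
    exact ih (fun hm => h1 (List.mem_cons_of_mem _ hm)) (fun hm => h2 (List.mem_cons_of_mem _ hm))

lemma pvClosed_unmatched (p cs' : List Char) (h1 : '{' ∉ p) (h2 : '}' ∈ p) :
    pvClosed (p ++ cs') = (false, some "Unmatched closing brace") := by
  induction p with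
  | nil => simp at h2
  | cons c t ih =>
    have hc1 : c ≠ '{' := fun he => h1 (he ▸ List.mem_cons_self ..)
    rw [List.cons_append]
    by_cases hc2 : c = '}'
    · simp [pvClosed, hc1, hc2]
    · simp only [pvClosed, if_neg hc1, if_neg hc2]
      exact ih (fun hm => h1 (List.mem_cons_of_mem _ hm))
        ((List.mem_cons.mp h2).resolve_left (fun he => hc2 he.symm))

lemma pvOpen_skip (p cs' : List Char) (jo : Bool) (h1 : '{' ∉ p) (h2 : '}' ∉ p) (h3 : p ≠ []) :
    pvOpen jo (p ++ cs') = pvOpen false cs' := by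
  induction p generalizing jo with
  | nil => simp at h3
  | cons c t ih =>
    have hc1 : c ≠ '{' := fun he => h1 (he ▸ List.mem_cons_self ..)
    have hc2 : c ≠ '}' := fun he => h2 (he ▸ List.mem_cons_self ..)
    rw [List.cons_append]
    simp only [pvOpen, if_neg hc1, if_neg hc2]
    rcases List.eq_nil_or_concat' t with rfl | ⟨L, b, rfl⟩
    · rfl
    · exact ih false (fun hm => h1 (List.mem_cons_of_mem _ hm))
        (fun hm => h2 (List.mem_cons_of_mem _ hm)) (by simp)

-- find on a singleton pattern: either absent, or a first-occurrence decomposition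
lemma find_singleton_cases (p : List Char) :
    (PySem.Chars.find p ['}'] = -1 ∧ '}' ∉ p) ∨
    (∃ (q t : List Char), PySem.Chars.find p ['}'] = (q.length : Int) ∧
      p = q ++ '}' :: t ∧ '}' ∉ q) := by
  by_cases hm : '}' ∈ p
  · right
    have hnn : 0 ≤ PySem.Chars.find p ['}'] :=
      (PySem.Chars.find_nonneg_iff p ['}']).mpr ((infix_singleton_iff_mem _ _).mpr hm)
    obtain ⟨hpre, hmin⟩ := PySem.Chars.find_spec hnn
    have hle : PySem.Chars.find p ['}'] ≤ (p.length : Int) := PySem.Chars.find_le_length p ['}']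
    set k := (PySem.Chars.find p ['}']).toNat with hk
    obtain ⟨t, ht⟩ := hpre
    have hklen : k < p.length := by
      by_contra hge
      have : p.drop k = [] := List.drop_eq_nil_of_le (by omega)
      rw [this] at ht; simp at ht
    refine ⟨p.take k, t, ?_, ?_, ?_⟩
    · simp only [List.length_take, hk]
      omega
    · conv_lhs => rw [← List.take_append_drop k p]
      rw [← ht]; rfl
    · intro hmem
      obtain ⟨i, hi, hpi⟩ := List.getElem_of_mem hmem
      have hilt : i < k := by simpa [Nat.min_eq_left hklen.le] using hi
      apply hmin i hilt
      have : p.drop i = '}' :: p.drop (i+1) := by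
        rw [← List.getElem_cons_drop (by omega : i < p.length)]
        congr 1
        rw [← hpi, List.getElem_take]
      exact ⟨p.drop (i+1), by rw [this]; rfl⟩
  · exact Or.inl ⟨(PySem.Chars.find_eq_neg_one_iff p ['}']).mpr
      (fun hinf => hm ((infix_singleton_iff_mem _ _).mp hinf)), hm⟩

-- a first '{' decomposition
lemma brace_decomp (cs : List Char) (h : '{' ∈ cs) :
    ∃ p r, cs = p ++ '{' :: r ∧ '{' ∉ p := by
  induction cs with
  | nil => simp at h
  | cons c t ih =>
    by_cases hc : c = '{'
    · exact ⟨[], t, by simp [hc], by simp⟩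
    · obtain ⟨p, r, rfl, hp⟩ := ih ((List.mem_cons.mp h).resolve_left (fun he => hc he.symm))
      refine ⟨c :: p, r, rfl, ?_⟩
      simp only [List.mem_cons, not_or]
      exact ⟨fun he => hc he.symm, hp⟩

-- the slice p[j+1:] for the decomposition p = q ++ '}' :: t, j = q.length
lemma slice_after (q t : List Char) :
    PySem.List.slice (q ++ '}' :: t) (some ((q.length : Int) + 1)) none = t := by
  have h1 : ((q.length : Int) + 1) = ((q.length + 1 : Nat) : Int) := by push_cast; ring
  rw [h1, PySem.List.slice_from_natCast]
  have h2 : q ++ '}' :: t = (q ++ ['}']) ++ t := by simp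
  rw [h2, List.drop_left' (by simp)]

-- open state, last piece (no '{' anywhere after)
lemma pv_open_noBrace (p : List Char) (hp : '{' ∉ p) : pvOpen true p = pvPartsB [p] := by
  rcases find_singleton_cases p with ⟨hf, hnm⟩ | ⟨q, t, hf, hdec, hq⟩
  · simp only [pvPartsB, hf, if_pos rfl]
    cases p with
    | nil => rfl
    | cons c t =>
      have hs := pvOpen_skip (c :: t) [] true hp hnm (by simp)
      simp only [List.append_nil] at hs
      rw [hs]; rfl
  · subst hdec
    cases q with
    | nil =>
      simp only [List.nil_append, List.length_nil, Nat.cast_zero] at hf ⊢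
      simp [pvPartsB, hf, pvOpen]
    | cons c q' =>
      have hqnob : '{' ∉ c :: q' := fun hm => hp (List.mem_append_left _ hm)
      have htnob : '{' ∉ t := fun hm => hp (List.mem_append_right _ (List.mem_cons_of_mem _ hm))
      have hs := pvOpen_skip (c :: q') ('}' :: t) true hqnob hq (by simp)
      rw [hs]
      simp only [pvOpen, if_neg (by decide : ¬'}' = '{'), Bool.false_eq_true, if_false, if_pos trivial]
      simp only [pvPartsB, hf, slice_after]
      rw [if_neg (by simp only [List.length_cons]; push_cast; omega), if_neg (by simp only [List.length_cons]; push_cast; omega)]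
      by_cases hmt : '}' ∈ t
      · rw [if_pos ((isIn_singleton _ _).mpr hmt)]
        simpa using pvClosed_unmatched t [] htnob hmt
      · rw [if_neg (fun hx => hmt ((isIn_singleton _ _).mp hx))]
        have := pvClosed_skip t [] htnob hmt
        simp only [List.append_nil] at this
        rw [this]; rfl

-- open state, a piece followed by the next '{'
lemma pv_open_brace (p r : List Char) (hp : '{' ∉ p)
    (hres : pvOpen true r = pvPartsB (pvSplitB r)) :
    pvOpen true (p ++ '{' :: r) = pvPartsB (p :: pvSplitB r) := by
  rcases find_singleton_cases p with ⟨hf, hnm⟩ | ⟨q, t, hf, hdec, hq⟩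
  · simp only [pvPartsB, hf, if_pos rfl, if_neg (pvSplitB_ne_nil r)]
    cases p with
    | nil => simp [pvOpen]
    | cons c t =>
      have hs := pvOpen_skip (c :: t) ('{' :: r) true hp hnm (by simp)
      rw [hs]
      simp [pvOpen]
  · subst hdec
    cases q with
    | nil =>
      simp only [List.nil_append, List.length_nil, Nat.cast_zero] at hf ⊢
      simp [pvPartsB, hf, pvOpen]
    | cons c q' =>
      have hqnob : '{' ∉ c :: q' := fun hm => hp (List.mem_append_left _ hm)
      have htnob : '{' ∉ t := fun hm => hp (List.mem_append_right _ (List.mem_cons_of_mem _ hm))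
      have hassoc : ((c :: q') ++ '}' :: t) ++ '{' :: r = (c :: q') ++ '}' :: (t ++ '{' :: r) := by
        simp
      rw [hassoc]
      have hs := pvOpen_skip (c :: q') ('}' :: (t ++ '{' :: r)) true hqnob hq (by simp)
      rw [hs]
      simp only [pvOpen, if_neg (by decide : ¬'}' = '{'), Bool.false_eq_true, if_false, if_pos trivial]
      simp only [pvPartsB, hf, slice_after]
      rw [if_neg (by simp only [List.length_cons]; push_cast; omega), if_neg (by simp only [List.length_cons]; push_cast; omega)]
      by_cases hmt : '}' ∈ t
      · rw [if_pos ((isIn_singleton _ _).mpr hmt)]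
        exact pvClosed_unmatched t ('{' :: r) htnob hmt
      · rw [if_neg (fun hx => hmt ((isIn_singleton _ _).mp hx))]
        rw [pvClosed_skip t ('{' :: r) htnob hmt]
        simp only [pvClosed]
        simpa using hres

lemma pv_main (n : Nat) : ∀ cs : List Char, cs.length ≤ n →
    (pvClosed cs =
      (match pvSplitB cs with
       | [] => (true, none)
       | head :: rest =>
         if PySem.Chars.isIn ['}'] head then (false, some "Unmatched closing brace")
         else pvPartsB rest)) ∧
    (pvOpen true cs = pvPartsB (pvSplitB cs)) := by
  induction n with
  | zero =>
    intro cs hlen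
    have hnil : cs = [] := List.eq_nil_of_length_eq_zero (by omega)
    subst hnil
    refine ⟨?_, ?_⟩
    · rw [pvSplitB_no_brace [] (by simp)]
      rfl
    · rw [pvSplitB_no_brace [] (by simp)]
      exact pv_open_noBrace [] (by simp)
  | succ n ih =>
    intro cs hlen
    by_cases hbr : '{' ∈ cs
    · obtain ⟨p, r, rfl, hp⟩ := brace_decomp cs hbr
      have hr : r.length ≤ n := by simp at hlen; omega
      have ihr := ih r hr
      rw [pvSplitB_append p r hp]
      refine ⟨?_, ?_⟩
      · show pvClosed (p ++ '{' :: r) =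
          if PySem.Chars.isIn ['}'] p then (false, some "Unmatched closing brace")
          else pvPartsB (pvSplitB r)
        by_cases hmp : '}' ∈ p
        · rw [if_pos ((isIn_singleton _ _).mpr hmp)]
          exact pvClosed_unmatched p ('{' :: r) hp hmp
        · rw [if_neg (fun hx => hmp ((isIn_singleton _ _).mp hx))]
          rw [pvClosed_skip p ('{' :: r) hp hmp]
          simp only [pvClosed]
          simpa using ihr.2
      · exact pv_open_brace p r hp ihr.2
    · rw [pvSplitB_no_brace cs hbr]
      refine ⟨?_, ?_⟩
      · show pvClosed cs =
          if PySem.Chars.isIn ['}'] cs then (false, some "Unmatched closing brace")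
          else pvPartsB []
        by_cases hm : '}' ∈ cs
        · rw [if_pos ((isIn_singleton _ _).mpr hm)]
          simpa using pvClosed_unmatched cs [] hbr hm
        · rw [if_neg (fun hx => hm ((isIn_singleton _ _).mp hx))]
          have := pvClosed_skip cs [] hbr hm
          simp only [List.append_nil] at this
          rw [this]; rfl
      · exact pv_open_noBrace cs hbr

-- ===== VERDICT (by name: the statement is the Claim_ definition above) =====
theorem validate_prompt_template_spec : Claim_equal_validate_prompt_template := by
  intro s _
  unfold Spec_validate_prompt_template validate_prompt_template validate_prompt_template_alt
  have h1 := pvLoopA_eq_states s.toList s.toList.length 0 0 false (by omega) (by simp)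
  have h2 := (pv_main s.toList.length s.toList le_rfl).1
  simp only [Bool.false_eq_true, if_false, List.drop_zero] at h1
  rw [h1, h2]
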